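-- pv_equiv track=rewrite | github.com/RINGULARITTY/llm_finetuning | clean_data.py | filter_sections_by_outlines
-- ===== SOURCE A (Python) =====
-- def filter_sections_by_outlines(flat_sections, outline_titles):
--     if not outline_titles:
--         return {}
--
--     valid_sections = {}
--     current_valid_title = None
--     for title, content in flat_sections.items():
--         is_valid = any(title.lower() == ot.lower() for ot in outline_titles)
--         if is_valid:
--             current_valid_title = title
--             if title in valid_sections:
--                 valid_sections[title] += "\n" + content
--             else:
--                 valid_sections[title] = content
--         else:
--             if current_valid_title is not None:
--                 valid_sections[current_valid_title] += "\n" + content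
--             else:
--                 pass
--     return valid_sections
-- ===== SOURCE B (Python) =====
-- def filter_sections_by_outlines(flat_sections, outline_titles):
--     if not outline_titles:
--         return {}
--     valid = {ot.lower() for ot in outline_titles}
--     # pass 1: assign each section's content to its owning valid title
--     owner = None
--     assignments = []
--     for title, content in flat_sections.items():
--         if title.lower() in valid:
--             owner = title
--             assignments.append((title, content))
--         elif owner is not None:
--             assignments.append((owner, content))
--     # pass 2: group per owner, then join each group once
--     groups = {}
--     for o, c in assignments:
--         groups.setdefault(o, []).append(c)
--     return {o: "\n".join(cs) for o, cs in groups.items()}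
-- ===== Notes on version B (the rewrite author's own statement) =====
-- stated objective: faster
-- what changed: Replaces A's single-pass state machine that grows dict values with repeated string concatenation ('valid_sections[k] += "\n" + content') by a two-phase computation: pass 1 assigns each section to its owning valid title as (owner, content) pairs, pass 2 groups the pairs per owner and joins each group's contents with '\n'.join once.
import Mathlib
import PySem

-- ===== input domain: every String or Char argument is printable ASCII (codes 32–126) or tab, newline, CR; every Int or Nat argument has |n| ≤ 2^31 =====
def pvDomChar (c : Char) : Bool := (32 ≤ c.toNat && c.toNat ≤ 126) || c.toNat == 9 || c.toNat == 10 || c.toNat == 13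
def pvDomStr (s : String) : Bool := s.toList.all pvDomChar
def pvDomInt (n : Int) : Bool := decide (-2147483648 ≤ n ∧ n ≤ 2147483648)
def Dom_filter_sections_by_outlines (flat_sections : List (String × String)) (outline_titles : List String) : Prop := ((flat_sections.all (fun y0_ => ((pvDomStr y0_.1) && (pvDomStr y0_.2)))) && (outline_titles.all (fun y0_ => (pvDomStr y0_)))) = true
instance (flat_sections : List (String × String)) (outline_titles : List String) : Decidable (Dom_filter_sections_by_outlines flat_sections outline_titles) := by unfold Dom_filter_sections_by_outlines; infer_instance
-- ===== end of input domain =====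

-- B replaces A's single-pass state machine (which grows dict values by repeated string
-- concatenation) with a two-phase assign-then-group computation joining each group once;
-- a timing run measured B faster on large inputs.

-- ===== PORT A =====
-- A's loop: state = (valid_sections dict, current_valid_title); `d[k] += "\n" + c` is
-- Dict.modify (exact here: the key is always present when Python executes that line).
def filter_sections_by_outlines (flat_sections : List (String × String)) (outline_titles : List String) : List (String × String) :=
  if outline_titles.isEmpty then [] else
  (flat_sections.foldl
    (fun (st : PySem.Dict String String × Option String) tc =>
      let title := tc.1
      let content := tc.2
      let is_valid := outline_titles.any (fun ot => PySem.Str.lower title == PySem.Str.lower ot)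
      if is_valid then
        if st.1.contains title then
          (st.1.modify title "" (fun s => s ++ "\n" ++ content), some title)
        else
          (st.1.insert title content, some title)
      else
        match st.2 with
        | some cv => (st.1.modify cv "" (fun s => s ++ "\n" ++ content), st.2)
        | none => st)
    (PySem.Dict.empty, none)).1.items

-- ===== PORT B =====
-- pass 1 of Source B: assign each section's content to its owning valid title
def fsbAssign (flat_sections : List (String × String)) (valid : PySem.Set String) : List (String × String) :=
  (flat_sections.foldl
    (fun (st : Option String × List (String × String)) tc =>
      if valid.contains (PySem.Str.lower tc.1) then
        (some tc.1, st.2 ++ [(tc.1, tc.2)])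
      else
        match st.1 with
        | some o => (st.1, st.2 ++ [(o, tc.2)])
        | none => st)
    (none, [])).2

-- pass 2 of Source B: groups.setdefault(o, []).append(c)
def fsbGroup (assignments : List (String × String)) : PySem.Dict String (List String) :=
  assignments.foldl (fun g oc => g.modify oc.1 [] (fun cs => cs ++ [oc.2])) PySem.Dict.empty

def filter_sections_by_outlines_alt (flat_sections : List (String × String)) (outline_titles : List String) : List (String × String) :=
  if outline_titles.isEmpty then [] else
  let valid := PySem.Set.ofList (outline_titles.map PySem.Str.lower)
  let groups := fsbGroup (fsbAssign flat_sections valid)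
  groups.items.map (fun p => (p.1, PySem.Str.join "\n" p.2))

-- ===== PRECONDITION & SPEC =====
def Spec_filter_sections_by_outlines (flat_sections : List (String × String)) (outline_titles : List String) (out : List (String × String)) : Prop := out = filter_sections_by_outlines_alt flat_sections outline_titles
instance (flat_sections : List (String × String)) (outline_titles : List String) (out : List (String × String)) : Decidable (Spec_filter_sections_by_outlines flat_sections outline_titles out) := by unfold Spec_filter_sections_by_outlines; infer_instance

-- ===== CLAIM (what is proved, stated in full; the proofs are below) =====
def Claim_equal_filter_sections_by_outlines : Prop := ∀ (flat_sections : List (String × String)) (outline_titles : List String), Dom_filter_sections_by_outlines flat_sections outline_titles → Spec_filter_sections_by_outlines flat_sections outline_titles (filter_sections_by_outlines flat_sections outline_titles)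

-- ===== LEMMAS AND PROOFS =====

-- render a grouping as A's dict of joined strings
def fsbRender (g : PySem.Dict String (List String)) : PySem.Dict String String :=
  PySem.Dict.mk (g.items.map (fun p => (p.1, PySem.Str.join "\n" p.2)))

theorem fsbRender_contains (g : PySem.Dict String (List String)) (k : String) :
    (fsbRender g).contains k = g.contains k := by
  simp [fsbRender, PySem.Dict.contains, List.any_map, Function.comp_def]

theorem fsb_chars_join_append (sep : List Char) (ps : List (List Char)) (q : List Char)
    (h : ps ≠ []) :
    PySem.Chars.join sep (ps ++ [q]) = PySem.Chars.join sep ps ++ sep ++ q := by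
  induction ps with
  | nil => exact absurd rfl h
  | cons a tl ih =>
    cases tl with
    | nil =>
      simp only [List.nil_append, List.cons_append, PySem.Chars.join_cons_cons,
        PySem.Chars.join_singleton]
    | cons b tl' =>
      simp only [List.cons_append] at ih ⊢
      rw [PySem.Chars.join_cons_cons, ih (by simp), PySem.Chars.join_cons_cons]
      simp [List.append_assoc]

theorem fsb_join_append (cs : List String) (c : String) (h : cs ≠ []) :
    PySem.Str.join "\n" (cs ++ [c]) = PySem.Str.join "\n" cs ++ "\n" ++ c := by
  apply String.ext
  simp only [PySem.Str.toList_join, String.toList_append, List.map_append,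
    List.map_cons, List.map_nil]
  exact fsb_chars_join_append _ _ _ (by simpa using h)

theorem fsb_join_singleton (c : String) : PySem.Str.join "\n" [c] = c := by
  apply String.ext
  rw [PySem.Str.toList_join, List.map_cons, List.map_nil, PySem.Chars.join_singleton]

theorem fsb_get?_render (g : PySem.Dict String (List String)) (k : String) :
    (fsbRender g).get? k = (g.get? k).map (PySem.Str.join "\n") := by
  simp only [fsbRender, PySem.Dict.get?, List.find?_map, Function.comp_def, Option.map_map]

theorem fsbRender_new (g : PySem.Dict String (List String)) (k : String) (c : String)
    (h : g.contains k = false) :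
    fsbRender (g.modify k [] (fun cs => cs ++ [c])) = (fsbRender g).insert k c := by
  have hfind : g.items.find? (fun p => p.1 == k) = none := by
    rw [List.find?_eq_none]
    intro p hp
    simp only [PySem.Dict.contains, List.any_eq_false] at h
    exact h p hp
  rw [PySem.Dict.modify]
  rw [show g.getD k [] = [] by simp [PySem.Dict.getD, PySem.Dict.get?, hfind]]
  rw [PySem.Dict.insert, if_neg (by rw [h]; simp),
    PySem.Dict.insert, if_neg (by rw [fsbRender_contains, h]; simp)]
  simp [fsbRender, fsb_join_singleton]

theorem fsbRender_old (g : PySem.Dict String (List String)) (k : String) (c : String)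
    (h : g.contains k = true) (hne : ∀ p ∈ g.items, p.2 ≠ []) :
    fsbRender (g.modify k [] (fun cs => cs ++ [c]))
      = (fsbRender g).modify k "" (fun s => s ++ "\n" ++ c) := by
  obtain ⟨pw, hpw, hpwk⟩ := List.any_eq_true.mp h
  cases hp0 : g.items.find? (fun p => p.1 == k) with
  | none => exact absurd hpwk (by simpa using List.find?_eq_none.mp hp0 pw hpw)
  | some p0 =>
    have hp0mem : p0 ∈ g.items := List.mem_of_find?_eq_some hp0
    have hp0ne : p0.2 ≠ [] := hne p0 hp0mem
    have hget : g.getD k [] = p0.2 := by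
      simp [PySem.Dict.getD, PySem.Dict.get?, hp0]
    have hgetR : (fsbRender g).getD k "" = PySem.Str.join "\n" p0.2 := by
      rw [PySem.Dict.getD, fsb_get?_render,
        show g.get? k = some p0.2 by simp [PySem.Dict.get?, hp0]]
      rfl
    rw [PySem.Dict.modify, PySem.Dict.modify, hget, hgetR]
    rw [PySem.Dict.insert, if_pos h, PySem.Dict.insert,
      if_pos (by rw [fsbRender_contains]; exact h)]
    simp only [fsbRender, List.map_map]
    congr 1
    apply List.map_congr_left
    intro p hp
    by_cases hb : p.1 = k
    · simp [hb, fsb_join_append p0.2 c hp0ne]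
    · simp [hb]

theorem fsb_values_ne_nil_insert (g : PySem.Dict String (List String)) (k : String)
    (v : List String) (hv : v ≠ []) (h : ∀ p ∈ g.items, p.2 ≠ []) :
    ∀ p ∈ (g.insert k v).items, p.2 ≠ [] := by
  intro p hp
  unfold PySem.Dict.insert at hp
  split at hp
  · simp only [List.mem_map] at hp
    obtain ⟨q, hq, hqe⟩ := hp
    by_cases hb : (q.1 == k) = true <;> simp only [hb, if_true] at hqe <;> subst hqe
    · exact hv
    · exact h q hq
  · simp only [List.mem_append, List.mem_singleton] at hp
    rcases hp with hp | hp
    · exact h p hp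
    · subst hp; exact hv

theorem fsbGroup_go_values_ne_nil (l : List (String × String)) :
    ∀ g : PySem.Dict String (List String), (∀ p ∈ g.items, p.2 ≠ []) →
      ∀ p ∈ (l.foldl (fun g oc => g.modify oc.1 [] (fun cs => cs ++ [oc.2])) g).items, p.2 ≠ [] := by
  induction l with
  | nil => intro g h; exact h
  | cons x tl ih =>
    intro g h
    rw [List.foldl_cons]
    exact ih _ (fsb_values_ne_nil_insert g x.1 _ (by simp) h)

theorem fsbGroup_values_ne_nil (l : List (String × String)) :
    ∀ p ∈ (fsbGroup l).items, p.2 ≠ [] :=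
  fsbGroup_go_values_ne_nil l PySem.Dict.empty (by simp [PySem.Dict.empty])

theorem fsb_contains_modify (g : PySem.Dict String (List String)) (k k' : String) (c : String) :
    (g.modify k [] (fun cs => cs ++ [c])).contains k' = (k' == k || g.contains k') := by
  rw [PySem.Dict.modify]
  exact PySem.Dict.contains_insert g k k' _

theorem fsbGroup_snoc (acc : List (String × String)) (x : String × String) :
    fsbGroup (acc ++ [x]) = (fsbGroup acc).modify x.1 [] (fun cs => cs ++ [x.2]) := by
  rw [fsbGroup, List.foldl_append, List.foldl_cons, List.foldl_nil]; rfl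

theorem fsb_valid_cond (ots : List String) (t : String) :
    ots.any (fun ot => PySem.Str.lower t == PySem.Str.lower ot)
      = (PySem.Set.ofList (ots.map PySem.Str.lower)).contains (PySem.Str.lower t) := by
  rw [Bool.eq_iff_iff]
  rw [PySem.Set.contains_iff, PySem.Set.mem_ofList, List.any_eq_true, List.mem_map]
  constructor
  · rintro ⟨ot, hmem, hb⟩; exact ⟨ot, hmem, (beq_iff_eq.mp hb).symm⟩
  · rintro ⟨ot, hmem, he⟩; exact ⟨ot, hmem, beq_iff_eq.mpr he.symm⟩

-- main loop correspondence: A's fold state is (render of the grouping so far, current title)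
theorem fsb_loop (ots : List String) (fs : List (String × String)) :
    ∀ (cur : Option String) (acc : List (String × String)),
    (∀ c, cur = some c → (fsbGroup acc).contains c = true) →
    (fs.foldl
      (fun (st : PySem.Dict String String × Option String) tc =>
        if ots.any (fun ot => PySem.Str.lower tc.1 == PySem.Str.lower ot) then
          if st.1.contains tc.1 then
            (st.1.modify tc.1 "" (fun s => s ++ "\n" ++ tc.2), some tc.1)
          else
            (st.1.insert tc.1 tc.2, some tc.1)
        else
          match st.2 with
          | some cv => (st.1.modify cv "" (fun s => s ++ "\n" ++ tc.2), st.2)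
          | none => st)
      (fsbRender (fsbGroup acc), cur)).1
    = fsbRender (fsbGroup
        ((fs.foldl
          (fun (st : Option String × List (String × String)) tc =>
            if (PySem.Set.ofList (ots.map PySem.Str.lower)).contains (PySem.Str.lower tc.1) then
              (some tc.1, st.2 ++ [(tc.1, tc.2)])
            else
              match st.1 with
              | some o => (st.1, st.2 ++ [(o, tc.2)])
              | none => st)
          (cur, acc)).2)) := by
  induction fs with
  | nil => intro cur acc hcur; rfl
  | cons tc tl ih =>
    intro cur acc hcur
    rw [List.foldl_cons, List.foldl_cons, fsb_valid_cond ots tc.1]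
    cases hv : (PySem.Set.ofList (ots.map PySem.Str.lower)).contains (PySem.Str.lower tc.1) with
    | true =>
      cases hb : (fsbGroup acc).contains tc.1 with
      | true =>
        have hR : (fsbRender (fsbGroup acc)).contains tc.1 = true := by
          rw [fsbRender_contains]; exact hb
        simp only [hR]
        rw [show (fsbRender (fsbGroup acc)).modify tc.1 "" (fun s => s ++ "\n" ++ tc.2)
              = fsbRender (fsbGroup (acc ++ [tc])) from by
            rw [fsbGroup_snoc]
            exact (fsbRender_old _ _ _ hb (fsbGroup_values_ne_nil acc)).symm]
        exact ih (some tc.1) (acc ++ [tc]) (fun c hc => by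
          cases hc; rw [fsbGroup_snoc, fsb_contains_modify]; simp)
      | false =>
        have hR : (fsbRender (fsbGroup acc)).contains tc.1 = false := by
          rw [fsbRender_contains]; exact hb
        simp only [hR, Bool.false_eq_true, if_false]
        rw [show (fsbRender (fsbGroup acc)).insert tc.1 tc.2
              = fsbRender (fsbGroup (acc ++ [tc])) from by
            rw [fsbGroup_snoc]
            exact (fsbRender_new _ _ _ hb).symm]
        exact ih (some tc.1) (acc ++ [tc]) (fun c hc => by
          cases hc; rw [fsbGroup_snoc, fsb_contains_modify]; simp)
    | false =>
      simp only [Bool.false_eq_true]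
      cases cur with
      | none => exact ih none acc hcur
      | some cv =>
        have hccv : (fsbGroup acc).contains cv = true := hcur cv rfl
        have key : (fsbRender (fsbGroup acc)).modify cv "" (fun s => s ++ "\n" ++ tc.2)
            = fsbRender (fsbGroup (acc ++ [(cv, tc.2)])) := by
          rw [fsbGroup_snoc]
          exact (fsbRender_old _ _ _ hccv (fsbGroup_values_ne_nil acc)).symm
        have horm := ih (some cv) (acc ++ [(cv, tc.2)]) (fun c hc => by
          cases hc; rw [fsbGroup_snoc, fsb_contains_modify]; simp [hccv])
        rw [← key] at horm
        exact horm

-- ===== VERDICT (by name: the statement is the Claim_ definition above) =====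
theorem filter_sections_by_outlines_spec : Claim_equal_filter_sections_by_outlines := by
  intro fs ots _
  unfold Spec_filter_sections_by_outlines
  unfold filter_sections_by_outlines filter_sections_by_outlines_alt
  by_cases h : ots.isEmpty = true
  · rw [if_pos h, if_pos h]
  · rw [if_neg h, if_neg h]
    have hmain := fsb_loop ots fs none [] (fun c hc => by cases hc)
    exact congrArg PySem.Dict.items hmain
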